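-- pv_equiv track=rewrite | github.com/morrislab/jple | jple/domain_utils.py | _per_residue_to_ranges
-- ===== SOURCE A (Python) =====
-- from typing import List, Tuple, Dict
--
-- def _per_residue_to_ranges(label_list: List[str]) -> \
--         Tuple[List[str], List[int], List[int]]:
--     """
--     Convert per-residue labels into domain ranges.
--
--     Parameters
--     ----------
--     label_list : List[str]
--         List of per-residue domain assignments.
--
--     Returns
--     -------
--     domain_list : List[str]
--         Domain names for each range.
--     start_list : List[int]
--         Start indices of the domain ranges (1-based).
--     end_list : List[int]
--         End indices of the domain ranges(1-based, inclusive).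
--
--     """
--     domain_list = []
--     start_list = []
--     end_list = []
--
--     cur_start = None
--     cur_label = None
--
--     # Iterate over the residues
--     for idx, label in enumerate(label_list):
--
--         # Residue is part of a domain
--         if label:
--             if cur_start is None:
--                 cur_start = idx
--                 cur_label = label
--             elif label != cur_label:
--                 domain_list.append(cur_label)
--                 start_list.append(cur_start)
--                 end_list.append(idx - 1)
--                 cur_start = idx
--                 cur_label = label
--
--         # Residue is not part of a domain
--         else:
--             if cur_start is not None:
--                 domain_list.append(cur_label)
--                 start_list.append(cur_start)
--                 end_list.append(idx - 1)
--                 cur_start = None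
--                 cur_label = None
--
--     # Save the final domain
--     if cur_start is not None:
--         domain_list.append(cur_label)
--         start_list.append(cur_start)
--         end_list.append(len(label_list) - 1)
--     return domain_list, start_list, end_list
-- ===== SOURCE B (Python) =====
-- from typing import List, Tuple
--
--
-- def _per_residue_to_ranges(label_list: List[str]) -> \
--         Tuple[List[str], List[int], List[int]]:
--     """Run-at-a-time scan: find each maximal run of equal labels,
--     emit it if its label is non-empty."""
--     n = len(label_list)
--     domain_list: List[str] = []
--     start_list: List[int] = []
--     end_list: List[int] = []
--     i = 0
--     while i < n:
--         j = i + 1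
--         while j < n and label_list[j] == label_list[i]:
--             j += 1
--         if label_list[i]:
--             domain_list.append(label_list[i])
--             start_list.append(i)
--             end_list.append(j - 1)
--         i = j
--     return domain_list, start_list, end_list
-- ===== Notes on version B (the rewrite author's own statement) =====
-- stated objective: alternative
-- what changed: Replaced A's per-residue state machine (carrying cur_start/cur_label across one loop with three flush sites) by a two-level scan that finds each maximal run of equal labels with an inner while and emits the run directly if its label is non-empty.
import Mathlib
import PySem

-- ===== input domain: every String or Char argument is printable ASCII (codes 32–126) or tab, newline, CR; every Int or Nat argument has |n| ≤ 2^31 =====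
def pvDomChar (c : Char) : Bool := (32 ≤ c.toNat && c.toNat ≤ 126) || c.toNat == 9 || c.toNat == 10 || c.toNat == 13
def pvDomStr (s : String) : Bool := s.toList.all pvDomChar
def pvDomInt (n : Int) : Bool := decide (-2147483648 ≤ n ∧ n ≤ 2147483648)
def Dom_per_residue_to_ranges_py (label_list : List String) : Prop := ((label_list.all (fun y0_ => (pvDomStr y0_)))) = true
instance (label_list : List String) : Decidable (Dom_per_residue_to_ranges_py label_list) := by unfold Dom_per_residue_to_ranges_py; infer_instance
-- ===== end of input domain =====

-- B replaces A's per-residue state machine by a run-at-a-time two-level scan (alternative decomposition, same cost).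

-- ===== PORT A =====
-- A's for-loop over enumerate(label_list): structural recursion carrying idx and
-- the state (domain_list, start_list, end_list, cur = (cur_start, cur_label)).
def loopA (idx : Int) (dl : List String) (sl el : List Int)
    (cur : Option (Int × String)) : List String → List String × List Int × List Int × Option (Int × String)
  | [] => (dl, sl, el, cur)
  | label :: rest =>
    if label ≠ "" then
      match cur with
      | none => loopA (idx + 1) dl sl el (some (idx, label)) rest
      | some (cs, cl) =>
        if label ≠ cl then
          loopA (idx + 1) (dl ++ [cl]) (sl ++ [cs]) (el ++ [idx - 1]) (some (idx, label)) rest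
        else
          loopA (idx + 1) dl sl el (some (cs, cl)) rest
    else
      match cur with
      | some (cs, cl) => loopA (idx + 1) (dl ++ [cl]) (sl ++ [cs]) (el ++ [idx - 1]) none rest
      | none => loopA (idx + 1) dl sl el none rest

-- A's final 'if cur_start is not None' flush (endIdx = len(label_list)).
def finishA (endIdx : Int) : List String × List Int × List Int × Option (Int × String) → List String × List Int × List Int
  | (dl, sl, el, some (cs, cl)) => (dl ++ [cl], sl ++ [cs], el ++ [endIdx - 1])
  | (dl, sl, el, none) => (dl, sl, el)

def per_residue_to_ranges_py (label_list : List String) : List String × List Int × List Int :=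
  finishA (label_list.length : Int) (loopA 0 [] [] [] none label_list)

-- ===== PORT B =====
-- Source B's outer while: at position i with remaining list x :: xs, the inner
-- while advances j past the elements equal to x (run length k = 1 + that count),
-- the run is emitted if x is non-empty, and the scan continues at i + k.
def altGo (i : Int) : List String → List String × List Int × List Int
  | [] => ([], [], [])
  | x :: xs =>
    let k : Int := 1 + ((xs.takeWhile (fun y => y == x)).length : Int)
    let r := altGo (i + k) (xs.dropWhile (fun y => y == x))
    if x ≠ "" then (x :: r.1, i :: r.2.1, (i + k - 1) :: r.2.2) else r
  termination_by l => l.length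
  decreasing_by
    simpa using Nat.lt_succ_of_le (List.length_dropWhile_le _ _)

def per_residue_to_ranges_py_alt (label_list : List String) : List String × List Int × List Int :=
  altGo 0 label_list

-- ===== PRECONDITION & SPEC =====
def Spec_per_residue_to_ranges_py (label_list : List String) (out : List String × List Int × List Int) : Prop := out = per_residue_to_ranges_py_alt label_list
instance (label_list : List String) (out : List String × List Int × List Int) : Decidable (Spec_per_residue_to_ranges_py label_list out) := by unfold Spec_per_residue_to_ranges_py; infer_instance

-- ===== CLAIM (what is proved, stated in full; the proofs are below) =====
def Claim_equal_per_residue_to_ranges_py : Prop := ∀ (label_list : List String), Dom_per_residue_to_ranges_py label_list → Spec_per_residue_to_ranges_py label_list (per_residue_to_ranges_py label_list)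

-- ===== LEMMAS AND PROOFS =====

/-- Append three accumulator lists componentwise. -/
def app3 (p q : List String × List Int × List Int) : List String × List Int × List Int :=
  (p.1 ++ q.1, p.2.1 ++ q.2.1, p.2.2 ++ q.2.2)

/-- Skipping one empty label advances altGo by one position. -/
theorem altGo_skip (i : Int) (xs : List String) : altGo i ("" :: xs) = altGo (i + 1) xs := by
  cases xs with
  | nil => simp [altGo]
  | cons y ys =>
    by_cases h : y = ""
    · subst h
      rw [altGo, altGo]
      simp [List.takeWhile, List.dropWhile]
      ring_nf
    · rw [altGo]
      have hy : (y == ("" : String)) = false := by simpa using h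
      simp [List.takeWhile, List.dropWhile, hy]

/-- Combined invariant for A's loop:
    (a) from state `none`, the flushed result is the accumulators followed by `altGo idx l`;
    (b) from state `some (cs, cl)` with `cl ≠ ""`, the current run is extended through the
        leading elements equal to `cl` and then everything proceeds as from `none`. -/
theorem loopA_invariant : ∀ (n : Nat) (l : List String), l.length = n →
    (∀ (idx : Int) (dl : List String) (sl el : List Int),
      finishA (idx + l.length) (loopA idx dl sl el none l) = app3 (dl, sl, el) (altGo idx l)) ∧
    (∀ (idx : Int) (dl : List String) (sl el : List Int) (cs : Int) (cl : String), cl ≠ "" →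
      finishA (idx + l.length) (loopA idx dl sl el (some (cs, cl)) l) =
        app3 (dl, sl, el)
          (let t : Int := ((l.takeWhile (fun y => y == cl)).length : Int)
           let r := altGo (idx + t) (l.dropWhile (fun y => y == cl))
           (cl :: r.1, cs :: r.2.1, (idx + t - 1) :: r.2.2))) := by
  intro n
  induction n using Nat.strong_induction_on with
  | _ n ih =>
    intro l hl
    constructor
    · -- (a)
      intro idx dl sl el
      cases l with
      | nil => simp [loopA, finishA, altGo, app3]
      | cons x xs =>
        have hxs : xs.length < n := by simp at hl; omega
        have hlen : idx + (((x :: xs).length : Nat) : Int) = (idx + 1) + (xs.length : Int) := by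
          push_cast [List.length_cons]; ring
        by_cases hx : x = ""
        · subst hx
          rw [loopA]
          simp only [ne_eq, not_true_eq_false, if_false]
          rw [hlen, (ih xs.length hxs xs rfl).1 (idx + 1) dl sl el, altGo_skip]
        · rw [loopA]
          simp only [ne_eq, hx, not_false_eq_true, if_true]
          rw [hlen, (ih xs.length hxs xs rfl).2 (idx + 1) dl sl el idx x hx, altGo]
          simp only [ne_eq, hx, not_false_eq_true, if_true]
          simp [add_assoc]
    · -- (b)
      intro idx dl sl el cs cl hcl
      cases l with
      | nil =>
        simp [loopA, finishA, altGo, app3]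
      | cons x xs =>
        have hxs : xs.length < n := by simp at hl; omega
        have hlen : idx + (((x :: xs).length : Nat) : Int) = (idx + 1) + (xs.length : Int) := by
          push_cast [List.length_cons]; ring
        by_cases hx : x = cl
        · -- continue the current run
          subst hx
          rw [loopA]
          simp only [ne_eq, hcl, not_false_eq_true, if_true, not_true_eq_false, if_false]
          rw [hlen, (ih xs.length hxs xs rfl).2 (idx + 1) dl sl el cs x hcl]
          simp [List.takeWhile, List.dropWhile, add_assoc, add_comm]
        · by_cases hxe : x = ""
          · -- run ends at an empty label: flush to state none
            subst hxe
            rw [loopA]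
            simp only [ne_eq, not_true_eq_false, if_false]
            rw [hlen, (ih xs.length hxs xs rfl).1 (idx + 1) (dl ++ [cl]) (sl ++ [cs]) (el ++ [idx - 1])]
            have hne : (("" : String) == cl) = false := by
              simpa using Ne.symm hcl
            rw [← altGo_skip]
            simp [List.takeWhile, List.dropWhile, hne, app3]
          · -- run ends at a different non-empty label: flush and start a new run
            rw [loopA]
            have hxc : ¬ x = cl := hx
            simp only [ne_eq, hxe, not_false_eq_true, if_true, hxc, if_true]
            rw [hlen, (ih xs.length hxs xs rfl).2 (idx + 1) (dl ++ [cl]) (sl ++ [cs]) (el ++ [idx - 1]) idx x hxe]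
            have hne : ((x : String) == cl) = false := by simpa using hxc
            simp only [List.takeWhile, List.dropWhile, hne]
            rw [altGo]
            simp only [ne_eq, hxe, not_false_eq_true, if_true]
            simp [app3, add_assoc]

-- ===== VERDICT (by name: the statement is the Claim_ definition above) =====
theorem per_residue_to_ranges_py_spec : Claim_equal_per_residue_to_ranges_py := by
  intro l _
  unfold Spec_per_residue_to_ranges_py per_residue_to_ranges_py per_residue_to_ranges_py_alt
  have := (loopA_invariant l.length l rfl).1 0 [] [] []
  simpa [app3] using this
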